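-- pv_equiv track=rewrite | github.com/josef-lin/Project-Euler | pe36.py | to_base2
-- ===== SOURCE A (Python) =====
-- def to_base2(num):
--     if num == 0:
--         return 0
--     elif num % 2 == 0:
--         num2 = 10*to_base2(num // 2)
--     else:
--         num2 = 1 + to_base2(num - 1)
--     return num2
-- ===== SOURCE B (Python) =====
-- def to_base2(num):
--     # Iterative: extract bits low-to-high, assemble decimal places with a running multiplier.
--     result = 0
--     place = 1
--     while num > 0:
--         result += (num % 2) * place
--         place *= 10
--         num //= 2
--     return result
-- ===== Notes on version B (the rewrite author's own statement) =====
-- stated objective: simpler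
-- what changed: Replaces the even/odd recursion with a single iterative while-loop that extracts num % 2 each step and accumulates it into a running decimal place value.
import Mathlib
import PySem

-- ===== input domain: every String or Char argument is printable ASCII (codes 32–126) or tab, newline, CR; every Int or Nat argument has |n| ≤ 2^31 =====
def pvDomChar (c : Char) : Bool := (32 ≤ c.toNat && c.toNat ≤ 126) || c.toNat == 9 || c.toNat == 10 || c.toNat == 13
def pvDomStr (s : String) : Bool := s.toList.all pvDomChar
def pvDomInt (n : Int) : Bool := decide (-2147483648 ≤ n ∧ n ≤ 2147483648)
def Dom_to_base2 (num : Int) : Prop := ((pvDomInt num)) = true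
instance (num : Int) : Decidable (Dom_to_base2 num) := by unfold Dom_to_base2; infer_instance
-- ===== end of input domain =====

-- B replaces A's even/odd recursion by one iterative loop extracting num % 2 into a running
-- decimal place value (objective: simpler). A recurses forever (RecursionError) on negative
-- input, so Pre_ restricts to 0 ≤ num.


-- ===== PORT A =====
-- A's recursion, made total with fuel (num.toNat + 1 steps always suffice on 0 ≤ num;
-- the fuel guard only makes the same computation total).
def to_base2Fuel : Nat → Int → Int
  | 0, _ => 0
  | f + 1, num =>
    if num = 0 then 0
    else if PySem.Int.mod num 2 = 0 then 10 * to_base2Fuel f (PySem.Int.floordiv num 2)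
    else 1 + to_base2Fuel f (num - 1)

def to_base2 (num : Int) : Int := to_base2Fuel (num.toNat + 1) num

-- ===== PORT B =====
-- B's while-loop: state (num, result, place); fuel num.toNat bounds the iteration count.
def to_base2AltLoop : Nat → Int → Int → Int → Int
  | 0, _, result, _ => result
  | f + 1, num, result, place =>
    if num > 0 then
      to_base2AltLoop f (PySem.Int.floordiv num 2) (result + PySem.Int.mod num 2 * place) (place * 10)
    else result

def to_base2_alt (num : Int) : Int := to_base2AltLoop num.toNat num 0 1

-- ===== PRECONDITION & SPEC =====
-- A never returns on negative input (infinite recursion / RecursionError), so Pre_ is 0 ≤ num.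
def Pre_to_base2 (num : Int) : Prop := 0 ≤ num
instance (num : Int) : Decidable (Pre_to_base2 num) := by unfold Pre_to_base2; infer_instance
def pvWitness_to_base2 : Int := (6)

def Spec_to_base2 (num : Int) (out : Int) : Prop := out = to_base2_alt num
instance (num : Int) (out : Int) : Decidable (Spec_to_base2 num out) := by unfold Spec_to_base2; infer_instance

-- ===== CLAIM (what is proved, stated in full; the proofs are below) =====
def Claim_equal_to_base2 : Prop := ∀ (num : Int), Dom_to_base2 num → Pre_to_base2 num → Spec_to_base2 num (to_base2 num)

-- ===== LEMMAS AND PROOFS =====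

-- Reference value: decimal rendering of the binary expansion of a Nat.
def binDec : Nat → Int
  | 0 => 0
  | n + 1 => 10 * binDec ((n + 1) / 2) + ((n + 1) % 2 : Nat)
decreasing_by exact Nat.div_lt_self (Nat.succ_pos n) (by omega)

lemma binDec_pos (n : Nat) (h : 0 < n) :
    binDec n = 10 * binDec (n / 2) + ((n % 2 : Nat) : Int) := by
  obtain ⟨m, rfl⟩ := Nat.exists_eq_succ_of_ne_zero (Nat.pos_iff_ne_zero.mp h)
  rw [binDec]

lemma floordiv_toNat (num : Int) (h : 0 ≤ num) :
    PySem.Int.floordiv num 2 = ((num.toNat / 2 : Nat) : Int) := by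
  have := PySem.Int.floordiv_natCast num.toNat 2
  rwa [Int.toNat_of_nonneg h] at this

lemma mod_toNat (num : Int) (h : 0 ≤ num) :
    PySem.Int.mod num 2 = ((num.toNat % 2 : Nat) : Int) := by
  have := PySem.Int.mod_natCast num.toNat 2
  rwa [Int.toNat_of_nonneg h] at this

lemma fuel_eq_binDec : ∀ (f : Nat) (num : Int), 0 ≤ num → num.toNat < f →
    to_base2Fuel f num = binDec num.toNat := by
  intro f
  induction f with
  | zero => intro num _ h; omega
  | succ f ih =>
    intro num hnn hf
    rw [to_base2Fuel]
    by_cases h0 : num = 0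
    · simp [h0, binDec]
    · have hpos : 0 < num := lt_of_le_of_ne hnn (Ne.symm h0)
      have hposN : 0 < num.toNat := by omega
      rw [if_neg h0]
      by_cases hev : PySem.Int.mod num 2 = 0
      · rw [if_pos hev, floordiv_toNat num hnn,
          ih _ (by positivity) (by simp; omega)]
        rw [binDec_pos _ hposN]
        simp only [Int.toNat_natCast]
        have : (num.toNat % 2 : Nat) = 0 := by
          have := mod_toNat num hnn
          omega
        simp [this]
      · rw [if_neg hev]
        have hmod : (num.toNat % 2 : Nat) = 1 := by
          have := mod_toNat num hnn
          have h2 : num.toNat % 2 = 0 ∨ num.toNat % 2 = 1 := Nat.mod_two_eq_zero_or_one _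
          rcases h2 with h2 | h2
          · exfalso; apply hev; rw [this, h2]; rfl
          · exact h2
        rw [ih _ (by omega) (by omega)]
        have hsub : (num - 1).toNat = num.toNat - 1 := by omega
        rw [hsub, binDec_pos _ hposN]
        have hsp : 0 < num.toNat - 1 ∨ num.toNat - 1 = 0 := by omega
        rcases hsp with hsp | hsp
        · rw [binDec_pos _ hsp]
          have hd : (num.toNat - 1) / 2 = num.toNat / 2 := by omega
          have hm : ((num.toNat - 1) % 2 : Nat) = 0 := by omega
          rw [hd, hm, hmod]
          push_cast
          ring
        · rw [hsp, hmod]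
          have : num.toNat = 1 := by omega
          simp [this, binDec]

lemma loop_eq_binDec : ∀ (f : Nat) (num result place : Int), 0 ≤ num → num.toNat ≤ f →
    to_base2AltLoop f num result place = result + place * binDec num.toNat := by
  intro f
  induction f with
  | zero =>
    intro num result place hnn hf
    have : num.toNat = 0 := by omega
    simp [to_base2AltLoop, this, binDec]
  | succ f ih =>
    intro num result place hnn hf
    rw [to_base2AltLoop]
    by_cases hpos : num > 0
    · have hposN : 0 < num.toNat := by omega
      rw [if_pos hpos, floordiv_toNat num hnn,
        ih _ _ _ (by positivity) (by simp; omega)]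
      rw [mod_toNat num hnn]
      simp only [Int.toNat_natCast]
      rw [binDec_pos _ hposN]
      ring
    · have : num.toNat = 0 := by omega
      rw [if_neg hpos]
      simp [this, binDec]

-- ===== VERDICT (by name: the statement is the Claim_ definition above) =====
theorem to_base2_spec : Claim_equal_to_base2 := by
  intro num _ hpre
  unfold Spec_to_base2 to_base2 to_base2_alt
  rw [fuel_eq_binDec _ _ hpre (by omega), loop_eq_binDec _ _ _ _ hpre (le_refl _)]
  ring
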